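-- pv_equiv track=rewrite | github.com/jjoshua2/arc_agi | unsolved/2025-10-02T04-30-48Z/e73095fd_best1.py | transform
-- ===== SOURCE A (Python) =====
-- from collections import deque
-- import copy
--
-- def transform(grid: list[list[int]]) -> list[list[int]]:
--     if not grid or not grid[0]:
--         return copy.deepcopy(grid)
--     h = len(grid)
--     w = len(grid[0])
--
--     directions = [(-1, 0), (1, 0), (0, -1), (0, 1)]
--
--     # First pass: find the maximum component size
--     visited = [[False] * w for _ in range(h)]
--     max_size = 0
--
--     def get_component_size(start_i, start_j):
--         size = 0
--         q = deque([(start_i, start_j)])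
--         visited[start_i][start_j] = True
--         while q:
--             x, y = q.popleft()
--             size += 1
--             for dx, dy in directions:
--                 nx, ny = x + dx, y + dy
--                 if 0 <= nx < h and 0 <= ny < w and not visited[nx][ny] and grid[nx][ny] == 0:
--                     visited[nx][ny] = True
--                     q.append((nx, ny))
--         return size
--
--     for i in range(h):
--         for j in range(w):
--             if grid[i][j] == 0 and not visited[i][j]:
--                 size = get_component_size(i, j)
--                 if size > max_size:
--                     max_size = size
--
--     if max_size == 0:
--         return copy.deepcopy(grid)
--
--     # Second pass: fill small components
--     output = copy.deepcopy(grid)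
--     visited = [[False] * w for _ in range(h)]
--
--     def fill_if_small(start_i, start_j):
--         component = []
--         q = deque([(start_i, start_j)])
--         visited[start_i][start_j] = True
--         component.append((start_i, start_j))
--         size = 1
--         while q:
--             x, y = q.popleft()
--             for dx, dy in directions:
--                 nx, ny = x + dx, y + dy
--                 if 0 <= nx < h and 0 <= ny < w and not visited[nx][ny] and output[nx][ny] == 0:
--                     visited[nx][ny] = True
--                     q.append((nx, ny))
--                     component.append((nx, ny))
--                     size += 1
--         if size < max_size:
--             for px, py in component:
--                 output[px][py] = 4
--         return size  # not used but for consistency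
--
--     for i in range(h):
--         for j in range(w):
--             if output[i][j] == 0 and not visited[i][j]:
--                 fill_if_small(i, j)
--
--     return output
-- ===== SOURCE B (Python) =====
-- import copy
--
-- def transform(grid: list[list[int]]) -> list[list[int]]:
--     if not grid or not grid[0]:
--         return copy.deepcopy(grid)
--     h, w = len(grid), len(grid[0])
--     seen = [[False] * w for _ in range(h)]
--     comps = []
--     for i in range(h):
--         for j in range(w):
--             if grid[i][j] == 0 and not seen[i][j]:
--                 comp = []
--                 stack = [(i, j)]
--                 seen[i][j] = True
--                 while stack:
--                     x, y = stack.pop()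
--                     comp.append((x, y))
--                     for nx, ny in ((x - 1, y), (x + 1, y), (x, y - 1), (x, y + 1)):
--                         if 0 <= nx < h and 0 <= ny < w and not seen[nx][ny] and grid[nx][ny] == 0:
--                             seen[nx][ny] = True
--                             stack.append((nx, ny))
--                 comps.append(comp)
--     out = copy.deepcopy(grid)
--     if not comps:
--         return out
--     biggest = max(len(c) for c in comps)
--     for comp in comps:
--         if len(comp) < biggest:
--             for x, y in comp:
--                 out[x][y] = 4
--     return out
-- ===== Notes on version B (the rewrite author's own statement) =====
-- stated objective: simpler
-- what changed: One DFS-with-explicit-stack pass that collects each zero-component as a list, then a single fill step over the collected components, instead of A's two separate BFS passes (size pass plus mutating fill pass) over the grid.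
import Mathlib
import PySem

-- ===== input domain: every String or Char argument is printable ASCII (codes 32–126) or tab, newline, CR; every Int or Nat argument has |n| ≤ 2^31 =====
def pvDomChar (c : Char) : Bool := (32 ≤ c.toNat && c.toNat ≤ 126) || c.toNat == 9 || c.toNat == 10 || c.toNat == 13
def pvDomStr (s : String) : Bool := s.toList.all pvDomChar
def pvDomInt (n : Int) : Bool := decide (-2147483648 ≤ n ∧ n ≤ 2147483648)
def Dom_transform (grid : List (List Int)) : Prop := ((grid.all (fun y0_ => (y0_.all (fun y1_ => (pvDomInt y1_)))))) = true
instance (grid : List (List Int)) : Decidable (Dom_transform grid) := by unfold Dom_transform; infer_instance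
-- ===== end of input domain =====

-- B replaces A's two BFS passes (a size pass and a mutating fill pass) by ONE DFS-stack pass
-- that collects the zero-components, followed by a single fill step (objective: simpler).

-- ===== PORT A =====
-- shared low-level encodings of the Python grid accesses:
-- grid[x][y] (only evaluated under 0 ≤ x < h, 0 ≤ y < w bound checks, as in the Python)
def pvGet (g : List (List Int)) (x y : Int) : Int := (g.getD x.toNat []).getD y.toNat 0

-- output[x][y] = v
def pvSet (g : List (List Int)) (x y : Int) (v : Int) : List (List Int) :=
  g.modify x.toNat (fun row => row.set y.toNat v)

-- the four neighbours in A's (and B's) direction order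
def pvNbrs (c : Int × Int) : List (Int × Int) :=
  [(c.1 - 1, c.2), (c.1 + 1, c.2), (c.1, c.2 - 1), (c.1, c.2 + 1)]

-- `0 <= nx < h and 0 <= ny < w and not visited[nx][ny] and grid[nx][ny] == 0`
-- (visited is encoded as the list of marked cells)
def pvElig (g : List (List Int)) (hh ww : Int) (vis : List (Int × Int)) (c : Int × Int) : Bool :=
  0 ≤ c.1 && c.1 < hh && 0 ≤ c.2 && c.2 < ww && !(vis.contains c) && pvGet g c.1 c.2 == 0

-- the row-major scan order `for i in range(h): for j in range(w)`
def pvCells (h w : Nat) : List (Int × Int) :=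
  (List.range h).flatMap (fun i => (List.range w).map (fun j => ((i : Int), (j : Int))))

-- A's get_component_size: BFS queue loop counting pops; fuel h*w+1 dominates the pop count
def bfsSize (g : List (List Int)) (hh ww : Int) :
    Nat → List (Int × Int) → List (Int × Int) → Int → List (Int × Int) × Int
  | 0, vis, _, n => (vis, n)
  | _ + 1, vis, [], n => (vis, n)
  | f + 1, vis, x :: q, n =>
    let p := (pvNbrs x).foldl
      (fun (s : List (Int × Int) × List (Int × Int)) c =>
        if pvElig g hh ww s.1 c then (c :: s.1, s.2 ++ [c]) else s) (vis, q)
    bfsSize g hh ww f p.1 p.2 (n + 1)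

-- A's fill_if_small BFS loop: collects the component (cells in enqueue order)
def bfsFill (out : List (List Int)) (hh ww : Int) :
    Nat → List (Int × Int) → List (Int × Int) → List (Int × Int) →
    List (Int × Int) × List (Int × Int)
  | 0, vis, _, comp => (vis, comp)
  | _ + 1, vis, [], comp => (vis, comp)
  | f + 1, vis, x :: q, comp =>
    let p := (pvNbrs x).foldl
      (fun (s : List (Int × Int) × List (Int × Int) × List (Int × Int)) c =>
        if pvElig out hh ww s.1 c then (c :: s.1, s.2.1 ++ [c], s.2.2 ++ [c]) else s)
      (vis, q, comp)
    bfsFill out hh ww f p.1 p.2.1 p.2.2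

-- first pass body: `if grid[i][j] == 0 and not visited[i][j]: size = ...; max_size = max`
def pass1Step (g : List (List Int)) (hh ww : Int) (fuel : Nat)
    (s : List (Int × Int) × Int) (c : Int × Int) : List (Int × Int) × Int :=
  if pvGet g c.1 c.2 == 0 && !(s.1.contains c) then
    let r := bfsSize g hh ww fuel (c :: s.1) [c] 0
    (r.1, if r.2 > s.2 then r.2 else s.2)
  else s

-- second pass body: rediscover the component on `output`, fill it with 4 when small
def pass2Step (hh ww : Int) (fuel : Nat) (m : Int)
    (s : List (List Int) × List (Int × Int)) (c : Int × Int) :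
    List (List Int) × List (Int × Int) :=
  if pvGet s.1 c.1 c.2 == 0 && !(s.2.contains c) then
    let r := bfsFill s.1 hh ww fuel (c :: s.2) [c] [c]
    ((if (r.2.length : Int) < m then r.2.foldl (fun o p => pvSet o p.1 p.2 4) s.1 else s.1), r.1)
  else s

def transform (grid : List (List Int)) : List (List Int) :=
  if grid.isEmpty || (grid.headD []).isEmpty then grid
  else
    let hh : Int := (grid.length : Int)
    let ww : Int := ((grid.headD []).length : Int)
    let fuel : Nat := grid.length * (grid.headD []).length + 1
    let p1 := (pvCells grid.length (grid.headD []).length).foldl (pass1Step grid hh ww fuel) ([], 0)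
    if p1.2 == 0 then grid
    else ((pvCells grid.length (grid.headD []).length).foldl (pass2Step hh ww fuel p1.2) (grid, [])).1

-- ===== PORT B =====
-- B's inner loop: DFS with an explicit stack (push = cons, pop = head),
-- collecting the component in pop order
def dfsComp (g : List (List Int)) (hh ww : Int) :
    Nat → List (Int × Int) → List (Int × Int) → List (Int × Int) →
    List (Int × Int) × List (Int × Int)
  | 0, vis, _, comp => (vis, comp)
  | _ + 1, vis, [], comp => (vis, comp)
  | f + 1, vis, x :: st, comp =>
    let p := (pvNbrs x).foldl
      (fun (s : List (Int × Int) × List (Int × Int)) c =>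
        if pvElig g hh ww s.1 c then (c :: s.1, c :: s.2) else s) (vis, st)
    dfsComp g hh ww f p.1 p.2 (comp ++ [x])

-- B's single scan body: collect each new component
def scanStep (g : List (List Int)) (hh ww : Int) (fuel : Nat)
    (s : List (Int × Int) × List (List (Int × Int))) (c : Int × Int) :
    List (Int × Int) × List (List (Int × Int)) :=
  if pvGet g c.1 c.2 == 0 && !(s.1.contains c) then
    let r := dfsComp g hh ww fuel (c :: s.1) [c] []
    (r.1, s.2 ++ [r.2])
  else s

-- B's fill step over the collected components
def fillStep (biggest : Int) (o : List (List Int)) (comp : List (Int × Int)) : List (List Int) :=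
  if (comp.length : Int) < biggest then comp.foldl (fun o p => pvSet o p.1 p.2 4) o else o

def transform_alt (grid : List (List Int)) : List (List Int) :=
  if grid.isEmpty || (grid.headD []).isEmpty then grid
  else
    let hh : Int := (grid.length : Int)
    let ww : Int := ((grid.headD []).length : Int)
    let fuel : Nat := grid.length * (grid.headD []).length + 1
    let sc := (pvCells grid.length (grid.headD []).length).foldl (scanStep grid hh ww fuel) ([], [])
    match sc.2 with
    | [] => grid
    | c0 :: rest =>
      let biggest := rest.foldl (fun m c => if (c.length : Int) > m then (c.length : Int) else m)
        ((c0.length : Int))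
      sc.2.foldl (fillStep biggest) grid

-- ===== PRECONDITION & SPEC =====
-- Pre_ excludes ragged grids in which some row is shorter than the first row:
-- there Python A raises IndexError (B raises there too).
def Pre_transform (grid : List (List Int)) : Prop :=
  ∀ row ∈ grid, (grid.headD []).length ≤ row.length
instance (grid : List (List Int)) : Decidable (Pre_transform grid) := by
  unfold Pre_transform; infer_instance

def pvWitness_transform : List (List Int) := [[0, 3, 0], [3, 3, 0], [0, 3, 0]]

def Spec_transform (grid : List (List Int)) (out : List (List Int)) : Prop := out = transform_alt grid
instance (grid : List (List Int)) (out : List (List Int)) : Decidable (Spec_transform grid out) := by unfold Spec_transform; infer_instance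

-- ===== CLAIM (what is proved, stated in full; the proofs are below) =====
def Claim_equal_transform : Prop := ∀ (grid : List (List Int)), Dom_transform grid → Pre_transform grid → Spec_transform grid (transform grid)

-- ===== LEMMAS AND PROOFS =====

-- ===== basic bridge lemmas =====
def InR (hh ww : Int) (c : Int × Int) : Prop := 0 ≤ c.1 ∧ c.1 < hh ∧ 0 ≤ c.2 ∧ c.2 < ww

theorem elig_iff (g : List (List Int)) (hh ww : Int) (vis : List (Int × Int)) (c : Int × Int) :
    pvElig g hh ww vis c = true ↔ (InR hh ww c ∧ c ∉ vis ∧ pvGet g c.1 c.2 = 0) := by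
  simp [pvElig, InR, and_assoc]

theorem elig_out_congr (out g : List (List Int)) (hh ww : Int) (vis : List (Int × Int))
    (h : ∀ d, InR hh ww d → pvGet out d.1 d.2 ≠ pvGet g d.1 d.2 → d ∈ vis) (c : Int × Int) :
    pvElig out hh ww vis c = pvElig g hh ww vis c := by
  by_cases hin : InR hh ww c
  · by_cases hv : c ∈ vis
    · simp [pvElig, hv]
    · have : pvGet out c.1 c.2 = pvGet g c.1 c.2 := by
        by_contra hne; exact hv (h c hin hne)
      simp only [pvElig, this]
  · have h1 : pvElig out hh ww vis c = false := by
      rw [← Bool.not_eq_true, elig_iff]; tauto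
    have h2 : pvElig g hh ww vis c = false := by
      rw [← Bool.not_eq_true, elig_iff]; tauto
    rw [h1, h2]

theorem nbrs_nodup (x : Int × Int) : (pvNbrs x).Nodup := by
  simp [pvNbrs, List.nodup_cons, Prod.ext_iff]
  omega

theorem mem_pvCells (h w : Nat) (c : Int × Int) :
    c ∈ pvCells h w ↔ InR (h : Int) (w : Int) c := by
  simp [pvCells, InR]
  constructor
  · rintro ⟨i, hi, j, hj, rfl, rfl⟩
    constructor <;> constructor <;> first | positivity | (push_cast; omega)
  · rintro ⟨h1, h2, h3, h4⟩
    exact ⟨c.1.toNat, by omega, c.2.toNat, by omega, by rw [Prod.ext_iff]; constructor <;> simp <;> omega⟩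

theorem length_pvCells (h w : Nat) : (pvCells h w).length = h * w := by
  simp [pvCells]

-- ===== the neighbour fold =====
theorem elig_prepend (g : List (List Int)) (hh ww : Int) (l vis : List (Int × Int))
    (c : Int × Int) (hc : c ∉ l) :
    pvElig g hh ww (l ++ vis) c = pvElig g hh ww vis c := by
  simp only [pvElig]
  have : ((l ++ vis).contains c) = (vis.contains c) := by
    simp [List.contains_eq_mem, hc]
  rw [this]

theorem fold_core {β : Type} (g : List (List Int)) (hh ww : Int) (push : β → (Int × Int) → β) :
    ∀ (ns : List (Int × Int)), ns.Nodup → ∀ (vis : List (Int × Int)) (b : β),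
    ns.foldl (fun (s : List (Int × Int) × β) c =>
        if pvElig g hh ww s.1 c then (c :: s.1, push s.2 c) else s) (vis, b)
      = ((ns.filter (fun c => pvElig g hh ww vis c)).reverse ++ vis,
         (ns.filter (fun c => pvElig g hh ww vis c)).foldl push b)
  | [], _, vis, b => by simp
  | c :: rest, hnd, vis, b => by
    have hcrest : c ∉ rest := by simp [List.nodup_cons] at hnd; exact hnd.1
    have hndr : rest.Nodup := by simp [List.nodup_cons] at hnd; exact hnd.2
    have hfilter : ∀ vis', (∀ d ∈ rest, pvElig g hh ww vis' d = pvElig g hh ww vis d) →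
        rest.filter (fun d => pvElig g hh ww vis' d) = rest.filter (fun d => pvElig g hh ww vis d) :=
      fun vis' h => List.filter_congr (fun d hd => by rw [h d hd])
    by_cases he : pvElig g hh ww vis c
    · simp only [List.foldl_cons, he, if_pos]
      rw [fold_core g hh ww push rest hndr (c :: vis) (push b c)]
      have hf : rest.filter (fun d => pvElig g hh ww (c :: vis) d)
          = rest.filter (fun d => pvElig g hh ww vis d) := by
        apply hfilter
        intro d hd
        have : d ≠ c := fun h => hcrest (h ▸ hd)
        have := elig_prepend g hh ww [c] vis d (by simp [this])
        simpa using this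
      rw [hf]
      simp [he]
    · simp only [List.foldl_cons, he, if_neg, Bool.not_eq_true]
      rw [fold_core g hh ww push rest hndr vis b]
      simp [he]

theorem foldl_push_append (news q : List (Int × Int)) :
    news.foldl (fun l c => l ++ [c]) q = q ++ news := by
  induction news generalizing q with
  | nil => simp
  | cons c rest ih => simp [ih]

theorem foldl_push_pair (news q comp : List (Int × Int)) :
    news.foldl (fun (b : List (Int × Int) × List (Int × Int)) c => (b.1 ++ [c], b.2 ++ [c])) (q, comp)
      = (q ++ news, comp ++ news) := by
  induction news generalizing q comp with
  | nil => simp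
  | cons c rest ih => simp [ih]

theorem foldl_push_cons (news st : List (Int × Int)) :
    news.foldl (fun l c => c :: l) st = news.reverse ++ st := by
  induction news generalizing st with
  | nil => simp
  | cons c rest ih => simp [ih]

-- ===== reachability and the worklist invariant =====
inductive Rch (g : List (List Int)) (hh ww : Int) (v0 : Int × Int → Prop) (s : Int × Int) :
    Int × Int → Prop
  | base : Rch g hh ww v0 s s
  | step {x n : Int × Int} : Rch g hh ww v0 s x → n ∈ pvNbrs x → InR hh ww n →
      pvGet g n.1 n.2 = 0 → ¬ v0 n → Rch g hh ww v0 s n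

theorem Rch_congr {g : List (List Int)} {hh ww : Int} {v0 v0' : Int × Int → Prop} {s c : Int × Int}
    (h : ∀ d, v0 d ↔ v0' d) (hr : Rch g hh ww v0 s c) : Rch g hh ww v0' s c := by
  induction hr with
  | base => exact Rch.base
  | step hx hn hin hz hv ih => exact Rch.step ih hn hin hz (fun hv' => hv ((h _).mpr hv'))

theorem Rch_inR {g : List (List Int)} {hh ww : Int} {v0 : Int × Int → Prop} {s c : Int × Int}
    (hs : InR hh ww s) (hr : Rch g hh ww v0 s c) : InR hh ww c := by
  induction hr with
  | base => exact hs
  | step _ _ hin _ _ _ => exact hin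

def WInv (g : List (List Int)) (hh ww : Int) (v0 : Int × Int → Prop) (s : Int × Int)
    (vis work popped : List (Int × Int)) : Prop :=
  s ∈ vis ∧
  (∀ c, c ∈ vis ↔ (v0 c ∨ c ∈ popped ∨ c ∈ work)) ∧
  (∀ c, (c ∈ popped ∨ c ∈ work) → Rch g hh ww v0 s c) ∧
  (∀ x ∈ popped, ∀ n ∈ pvNbrs x, InR hh ww n → pvGet g n.1 n.2 = 0 → n ∈ vis) ∧
  (popped ++ work).Nodup

theorem inv_init (g : List (List Int)) (hh ww : Int) (v0l : List (Int × Int)) (s : Int × Int) :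
    WInv g hh ww (· ∈ v0l) s (s :: v0l) [s] [] := by
  refine ⟨by simp, fun c => by simp [or_comm], fun c hc => ?_, by simp, by simp⟩
  rcases hc with hc | hc
  · simp at hc
  · simp at hc; subst hc; exact Rch.base

theorem inv_step {g : List (List Int)} {hh ww : Int} {v0 : Int × Int → Prop} {s : Int × Int}
    {vis q popped : List (Int × Int)} {x : Int × Int}
    (hInv : WInv g hh ww v0 s vis (x :: q) popped)
    {work' : List (Int × Int)}
    (hperm : work'.Perm (q ++ (pvNbrs x).filter (fun c => pvElig g hh ww vis c))) :
    WInv g hh ww v0 s (((pvNbrs x).filter (fun c => pvElig g hh ww vis c)).reverse ++ vis)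
      work' (popped ++ [x]) := by
  obtain ⟨hs, hmem, hrch, hcl, hnd⟩ := hInv
  set news := (pvNbrs x).filter (fun c => pvElig g hh ww vis c) with hnews
  have hx_rch : Rch g hh ww v0 s x := hrch x (Or.inr (by simp))
  have hnews_rch : ∀ c ∈ news, Rch g hh ww v0 s c := by
    intro c hc
    rw [hnews, List.mem_filter] at hc
    obtain ⟨hcn, hce⟩ := hc
    rw [elig_iff] at hce
    obtain ⟨hin, hnv, hz⟩ := hce
    exact Rch.step hx_rch hcn hin hz (fun hv => hnv ((hmem c).mpr (Or.inl hv)))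
  have hnews_fresh : ∀ c ∈ news, c ∉ vis := by
    intro c hc
    rw [hnews, List.mem_filter] at hc
    exact ((elig_iff _ _ _ _ _).mp hc.2).2.1
  have hw' : ∀ c, c ∈ work' ↔ (c ∈ q ∨ c ∈ news) := by
    intro c; rw [hperm.mem_iff]; simp
  refine ⟨by simp [hs], ?_, ?_, ?_, ?_⟩
  · intro c
    simp only [List.mem_append, List.mem_reverse, hw', List.mem_singleton]
    rw [hmem c]
    simp only [List.mem_cons]
    constructor
    · rintro (hc | hc)
      · tauto
      · rcases hc with hc | hc | hc <;> tauto
    · rintro (hc | hc | hc)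
      · tauto
      · rcases hc with hc | hc <;> tauto
      · rcases hc with hc | hc <;> tauto
  · intro c hc
    rcases hc with hc | hc
    · rw [List.mem_append] at hc
      rcases hc with hc | hc
      · exact hrch c (Or.inl hc)
      · simp at hc; subst hc; exact hx_rch
    · rw [hw'] at hc
      rcases hc with hc | hc
      · exact hrch c (Or.inr (by simp [hc]))
      · exact hnews_rch c hc
  · intro y hy n hn hin hz
    rw [List.mem_append] at hy
    simp only [List.mem_append, List.mem_reverse]
    rcases hy with hy | hy
    · exact Or.inr (hcl y hy n hn hin hz)
    · simp at hy; subst hy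
      by_cases hv : n ∈ vis
      · exact Or.inr hv
      · left
        rw [hnews, List.mem_filter]
        exact ⟨hn, (elig_iff _ _ _ _ _).mpr ⟨hin, hv, hz⟩⟩
  · have hperm2 : ((popped ++ [x]) ++ work').Perm ((popped ++ x :: q) ++ news) := by
      calc ((popped ++ [x]) ++ work').Perm ((popped ++ [x]) ++ (q ++ news)) :=
            List.Perm.append_left _ hperm
        _ = (popped ++ (x :: q)) ++ news := by simp
    rw [hperm2.nodup_iff]
    rw [List.nodup_append]
    refine ⟨hnd, ?_, ?_⟩
    · rw [hnews]; exact (nbrs_nodup x).filter _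
    · intro a ha b hb heq
      subst heq
      have : a ∈ vis := (hmem a).mpr (by
        rw [List.mem_append] at ha
        rcases ha with ha | ha
        · exact Or.inr (Or.inl ha)
        · exact Or.inr (Or.inr ha))
      exact hnews_fresh a hb this

theorem inv_final {g : List (List Int)} {hh ww : Int} {v0 : Int × Int → Prop} {s : Int × Int}
    {vis popped : List (Int × Int)}
    (hs0 : ¬ v0 s) (hInv : WInv g hh ww v0 s vis [] popped) :
    (∀ c, c ∈ popped ↔ Rch g hh ww v0 s c) ∧
    (∀ c, c ∈ vis ↔ (v0 c ∨ Rch g hh ww v0 s c)) ∧ popped.Nodup := by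
  obtain ⟨hs, hmem, hrch, hcl, hnd⟩ := hInv
  have hfwd : ∀ c, Rch g hh ww v0 s c → c ∈ popped := by
    intro c hr
    induction hr with
    | base =>
      have := (hmem s).mp hs
      rcases this with h | h | h
      · exact absurd h hs0
      · exact h
      · simp at h
    | step hx hn hin hz hv ih =>
      have := (hmem _).mp (hcl _ ih _ hn hin hz)
      rcases this with h | h | h
      · exact absurd h hv
      · exact h
      · simp at h
  have hpop : ∀ c, c ∈ popped ↔ Rch g hh ww v0 s c :=
    fun c => ⟨fun hc => hrch c (Or.inl hc), hfwd c⟩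
  refine ⟨hpop, fun c => ?_, by simpa using hnd⟩
  rw [hmem c]
  simp [hpop c]

theorem inv_popped_le {g : List (List Int)} {h w : Nat} {v0 : Int × Int → Prop} {s : Int × Int}
    {vis work popped : List (Int × Int)}
    (hs : InR (h : Int) (w : Int) s)
    (hInv : WInv g (h : Int) (w : Int) v0 s vis work popped) :
    popped.length ≤ h * w := by
  obtain ⟨_, _, hrch, _, hnd⟩ := hInv
  have hsub : popped ⊆ pvCells h w := by
    intro c hc
    rw [mem_pvCells]
    exact Rch_inR hs (hrch c (Or.inl hc))
  have hndp : popped.Nodup := (List.nodup_append.mp hnd).1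
  have := (List.subperm_of_subset hndp hsub).length_le
  rwa [length_pvCells] at this

-- ===== specialized fold characterizations =====
theorem fold_A (g : List (List Int)) (hh ww : Int) (x : Int × Int)
    (vis q : List (Int × Int)) :
    (pvNbrs x).foldl (fun (s : List (Int × Int) × List (Int × Int)) c =>
        if pvElig g hh ww s.1 c then (c :: s.1, s.2 ++ [c]) else s) (vis, q)
      = (((pvNbrs x).filter (fun c => pvElig g hh ww vis c)).reverse ++ vis,
         q ++ (pvNbrs x).filter (fun c => pvElig g hh ww vis c)) := by
  have := fold_core g hh ww (fun l c => l ++ [c]) (pvNbrs x) (nbrs_nodup x) vis q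
  rw [this, foldl_push_append]

theorem fold_F (out : List (List Int)) (hh ww : Int) (x : Int × Int)
    (vis q comp : List (Int × Int)) :
    (pvNbrs x).foldl (fun (s : List (Int × Int) × List (Int × Int) × List (Int × Int)) c =>
        if pvElig out hh ww s.1 c then (c :: s.1, s.2.1 ++ [c], s.2.2 ++ [c]) else s) (vis, q, comp)
      = (((pvNbrs x).filter (fun c => pvElig out hh ww vis c)).reverse ++ vis,
         q ++ (pvNbrs x).filter (fun c => pvElig out hh ww vis c),
         comp ++ (pvNbrs x).filter (fun c => pvElig out hh ww vis c)) := by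
  have := fold_core out hh ww
    (fun (b : List (Int × Int) × List (Int × Int)) c => (b.1 ++ [c], b.2 ++ [c]))
    (pvNbrs x) (nbrs_nodup x) vis (q, comp)
  rw [this, foldl_push_pair]

theorem fold_B (g : List (List Int)) (hh ww : Int) (x : Int × Int)
    (vis st : List (Int × Int)) :
    (pvNbrs x).foldl (fun (s : List (Int × Int) × List (Int × Int)) c =>
        if pvElig g hh ww s.1 c then (c :: s.1, c :: s.2) else s) (vis, st)
      = (((pvNbrs x).filter (fun c => pvElig g hh ww vis c)).reverse ++ vis,
         ((pvNbrs x).filter (fun c => pvElig g hh ww vis c)).reverse ++ st) := by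
  have := fold_core g hh ww (fun l c => c :: l) (pvNbrs x) (nbrs_nodup x) vis st
  rw [this, foldl_push_cons]

-- ===== run lemmas =====
theorem bfsSize_run (g : List (List Int)) (h w : Nat) (v0 : Int × Int → Prop) (s : Int × Int)
    (hs : InR (h : Int) (w : Int) s) :
    ∀ (fuel : Nat) (vis work popped : List (Int × Int)) (n : Int),
    WInv g (h : Int) (w : Int) v0 s vis work popped →
    h * w + 1 ≤ fuel + popped.length →
    ∃ visF P, bfsSize g (h : Int) (w : Int) fuel vis work n = (visF, n + (P.length : Int)) ∧
      WInv g (h : Int) (w : Int) v0 s visF [] (popped ++ P) := by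
  intro fuel
  induction fuel with
  | zero =>
    intro vis work popped n hInv hfuel
    have := inv_popped_le hs hInv
    omega
  | succ f ih =>
    intro vis work popped n hInv hfuel
    match work with
    | [] =>
      refine ⟨vis, [], by simp [bfsSize], by simpa using hInv⟩
    | x :: q =>
      have hstep := inv_step hInv (work' := q ++ (pvNbrs x).filter (fun c => pvElig g (h : Int) (w : Int) vis c)) (List.Perm.refl _)
      obtain ⟨visF, P', heq, hinvF⟩ := ih _ _ _ (n + 1) hstep (by simp; omega)
      refine ⟨visF, x :: P', ?_, ?_⟩
      · show bfsSize g (h : Int) (w : Int) (f + 1) vis (x :: q) n = _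
        rw [bfsSize, fold_A, heq]
        congr 1
        simp only [List.length_cons]
        push_cast
        omega
      · rwa [List.append_assoc, List.singleton_append] at hinvF

theorem bfsFill_run (out g : List (List Int)) (h w : Nat) (v0 : Int × Int → Prop) (s : Int × Int)
    (hs : InR (h : Int) (w : Int) s)
    (hout : ∀ d, InR (h : Int) (w : Int) d → pvGet out d.1 d.2 ≠ pvGet g d.1 d.2 → v0 d) :
    ∀ (fuel : Nat) (vis work comp popped : List (Int × Int)),
    WInv g (h : Int) (w : Int) v0 s vis work popped →
    comp.Perm (popped ++ work) →
    h * w + 1 ≤ fuel + popped.length →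
    ∃ visF compF P, bfsFill out (h : Int) (w : Int) fuel vis work comp = (visF, compF) ∧
      WInv g (h : Int) (w : Int) v0 s visF [] (popped ++ P) ∧ compF.Perm (popped ++ P) := by
  intro fuel
  induction fuel with
  | zero =>
    intro vis work comp popped hInv hcomp hfuel
    have := inv_popped_le hs hInv
    omega
  | succ f ih =>
    intro vis work comp popped hInv hcomp hfuel
    match work with
    | [] =>
      exact ⟨vis, comp, [], by simp [bfsFill], by simpa using hInv, by simpa using hcomp⟩
    | x :: q =>
      have hvis : ∀ d, InR (h : Int) (w : Int) d → pvGet out d.1 d.2 ≠ pvGet g d.1 d.2 → d ∈ vis :=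
        fun d hin hne => (hInv.2.1 d).mpr (Or.inl (hout d hin hne))
      have hfe : (pvNbrs x).filter (fun c => pvElig out (h : Int) (w : Int) vis c)
          = (pvNbrs x).filter (fun c => pvElig g (h : Int) (w : Int) vis c) :=
        List.filter_congr (fun c _ => by rw [elig_out_congr out g _ _ vis hvis c])
      have hstep := inv_step hInv (work' := q ++ (pvNbrs x).filter (fun c => pvElig g (h : Int) (w : Int) vis c)) (List.Perm.refl _)
      have hcomp' : (comp ++ (pvNbrs x).filter (fun c => pvElig g (h : Int) (w : Int) vis c)).Perm
          ((popped ++ [x]) ++ (q ++ (pvNbrs x).filter (fun c => pvElig g (h : Int) (w : Int) vis c))) := by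
        calc (comp ++ _).Perm ((popped ++ x :: q) ++ _) := hcomp.append_right _
          _ = (popped ++ [x]) ++ (q ++ _) := by simp
      obtain ⟨visF, compF, P', heq, hinvF, hcompF⟩ := ih _ _ _ _ hstep hcomp' (by simp; omega)
      refine ⟨visF, compF, x :: P', ?_, ?_, ?_⟩
      · show bfsFill out (h : Int) (w : Int) (f + 1) vis (x :: q) comp = _
        rw [bfsFill, fold_F, hfe, heq]
      · rwa [List.append_assoc, List.singleton_append] at hinvF
      · rwa [List.append_assoc, List.singleton_append] at hcompF

theorem dfsComp_run (g : List (List Int)) (h w : Nat) (v0 : Int × Int → Prop) (s : Int × Int)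
    (hs : InR (h : Int) (w : Int) s) :
    ∀ (fuel : Nat) (vis work comp popped : List (Int × Int)),
    WInv g (h : Int) (w : Int) v0 s vis work popped →
    comp.Perm popped →
    h * w + 1 ≤ fuel + popped.length →
    ∃ visF compF P, dfsComp g (h : Int) (w : Int) fuel vis work comp = (visF, compF) ∧
      WInv g (h : Int) (w : Int) v0 s visF [] (popped ++ P) ∧ compF.Perm (popped ++ P) := by
  intro fuel
  induction fuel with
  | zero =>
    intro vis work comp popped hInv hcomp hfuel
    have := inv_popped_le hs hInv
    omega
  | succ f ih =>
    intro vis work comp popped hInv hcomp hfuel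
    match work with
    | [] =>
      exact ⟨vis, comp, [], by simp [dfsComp], by simpa using hInv, by simpa using hcomp⟩
    | x :: q =>
      have hperm : (((pvNbrs x).filter (fun c => pvElig g (h : Int) (w : Int) vis c)).reverse ++ q).Perm
          (q ++ (pvNbrs x).filter (fun c => pvElig g (h : Int) (w : Int) vis c)) := by
        calc (((pvNbrs x).filter _).reverse ++ q).Perm ((pvNbrs x).filter _ ++ q) :=
              ((pvNbrs x).filter _).reverse_perm.append_right q
          _ |>.Perm _ := List.perm_append_comm
      have hstep := inv_step hInv hperm
      have hcomp' : (comp ++ [x]).Perm (popped ++ [x]) := hcomp.append_right _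
      obtain ⟨visF, compF, P', heq, hinvF, hcompF⟩ := ih _ _ _ _ hstep hcomp' (by simp; omega)
      refine ⟨visF, compF, x :: P', ?_, ?_, ?_⟩
      · show dfsComp g (h : Int) (w : Int) (f + 1) vis (x :: q) comp = _
        rw [dfsComp, fold_B, heq]
      · rwa [List.append_assoc, List.singleton_append] at hinvF
      · calc compF.Perm ((popped ++ [x]) ++ P') := hcompF
          _ = popped ++ x :: P' := by simp

-- ===== pointwise description of the fill =====
def pwF (g : List (List Int)) (f : Int × Int → Bool) : List (List Int) :=
  List.mapIdx (fun i row => List.mapIdx (fun j v => if f ((i : Int), (j : Int)) then 4 else v) row) g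

theorem pw_congr (g : List (List Int)) {f f' : Int × Int → Bool}
    (h : ∀ c, f c = f' c) : pwF g f = pwF g f' := by
  have : f = f' := funext h
  rw [this]

theorem mapIdx_id' {α : Type} (l : List α) : List.mapIdx (fun _ v => v) l = l := by
  apply List.ext_getElem
  · simp
  · intro i hi hi'
    simp

theorem pw_false (g : List (List Int)) : pwF g (fun _ => false) = g := by
  unfold pwF
  apply List.ext_getElem
  · simp
  · intro i hi hi'
    simp [mapIdx_id']

theorem pvSet_pw (g : List (List Int)) (f : Int × Int → Bool) (c : Int × Int)
    (h1 : 0 ≤ c.1) (h2 : 0 ≤ c.2) :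
    pvSet (pwF g f) c.1 c.2 4 = pwF g (fun d => f d || (d == c)) := by
  unfold pvSet pwF
  apply List.ext_getElem
  · simp
  · intro i hi hi'
    rw [List.getElem_modify]
    by_cases hic : c.1.toNat = i
    · rw [if_pos hic]
      apply List.ext_getElem
      · simp
      · intro j hj hj'
        rw [List.getElem_set]
        simp only [List.getElem_mapIdx]
        by_cases hjc : c.2.toNat = j
        · rw [if_pos hjc]
          have : (((i : Int), (j : Int)) == c) = true := by
            simp [Prod.ext_iff]; omega
          simp [this]
        · rw [if_neg hjc]
          have : (((i : Int), (j : Int)) == c) = false := by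
            simp [Prod.ext_iff]; omega
          simp [this]
    · rw [if_neg hic]
      simp only [List.length_mapIdx] at hi hi'
      simp only [List.getElem_mapIdx]
      apply List.ext_getElem
      · simp
      · intro j hj hj'
        simp only [List.getElem_mapIdx]
        have : (((i : Int), (j : Int)) == c) = false := by
          simp [Prod.ext_iff]; omega
        simp [this]

theorem pvGet_pw_eq (g : List (List Int)) (f : Int × Int → Bool) (x y : Int)
    (hf : f ((x.toNat : Int), (y.toNat : Int)) = false) :
    pvGet (pwF g f) x y = pvGet g x y := by
  unfold pvGet pwF
  simp only [List.getD_eq_getElem?_getD, List.getElem?_mapIdx]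
  cases hg : g[x.toNat]? with
  | none => simp
  | some row =>
    simp only [Option.map_some, Option.getD_some, List.getElem?_mapIdx]
    cases hr : row[y.toNat]? with
    | none => simp
    | some v =>
      simp only [Option.map_some, Option.getD_some]
      simp only [Int.ofNat_toNat] at hf
      simp [hf]

theorem fill_foldl (g : List (List Int)) :
    ∀ (L : List (Int × Int)) (f : Int × Int → Bool), (∀ c ∈ L, 0 ≤ c.1 ∧ 0 ≤ c.2) →
    L.foldl (fun o p => pvSet o p.1 p.2 4) (pwF g f) = pwF g (fun d => f d || L.contains d)
  | [], f, _ => by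
    rw [List.foldl_nil]
    exact pw_congr g (fun c => by simp)
  | c :: rest, f, hL => by
    rw [List.foldl_cons]
    rw [pvSet_pw g f c (hL c (by simp)).1 (hL c (by simp)).2]
    rw [fill_foldl g rest _ (fun d hd => hL d (by simp [hd]))]
    exact pw_congr g (fun d => by
      simp only [List.contains_cons]
      by_cases h1 : f d <;> by_cases h2 : d == c <;> simp [h1, h2])

theorem fill_outer (g : List (List Int)) (M : Int) :
    ∀ (comps : List (List (Int × Int))) (f : Int × Int → Bool),
    (∀ cp ∈ comps, ∀ c ∈ cp, 0 ≤ c.1 ∧ 0 ≤ c.2) →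
    comps.foldl (fillStep M) (pwF g f)
      = pwF g (fun d => f d || comps.any (fun cp => ((cp.length : Int) < M) && cp.contains d))
  | [], f, _ => by
    rw [List.foldl_nil]
    exact pw_congr g (fun c => by simp)
  | cp :: rest, f, hc => by
    rw [List.foldl_cons]
    by_cases hsm : (cp.length : Int) < M
    · rw [show fillStep M (pwF g f) cp = cp.foldl (fun o p => pvSet o p.1 p.2 4) (pwF g f) from by
        unfold fillStep; rw [if_pos hsm]]
      rw [fill_foldl g cp f (hc cp (by simp))]
      rw [fill_outer g M rest _ (fun cp' h' => hc cp' (by simp [h']))]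
      exact pw_congr g (fun d => by
        simp only [List.any_cons, hsm]
        by_cases h1 : f d <;> by_cases h2 : cp.contains d <;> simp [h1])
    · rw [show fillStep M (pwF g f) cp = pwF g f from by unfold fillStep; rw [if_neg hsm]]
      rw [fill_outer g M rest f (fun cp' h' => hc cp' (by simp [h']))]
      exact pw_congr g (fun d => by
        simp only [List.any_cons]
        have : ((cp.length : Int) < M : Bool) = false := by simpa using hsm
        simp [this])

-- ===== the running-maximum chain =====
def mstep (m x : Int) : Int := if x > m then x else m

theorem le_foldl_mstep : ∀ (l : List Int) (a : Int), a ≤ l.foldl mstep a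
  | [], a => le_refl a
  | x :: rest, a => by
    rw [List.foldl_cons]
    calc a ≤ mstep a x := by unfold mstep; split <;> omega
      _ ≤ _ := le_foldl_mstep rest _

theorem mem_le_foldl_mstep : ∀ (l : List Int) (a : Int) (x : Int), x ∈ l → x ≤ l.foldl mstep a
  | x :: rest, a, y, hy => by
    rw [List.foldl_cons]
    rcases List.mem_cons.mp hy with h | h
    · subst h
      calc y ≤ mstep a y := by unfold mstep; split <;> omega
        _ ≤ _ := le_foldl_mstep rest _
    · exact mem_le_foldl_mstep rest _ y h

-- ===== simulation of the two scans =====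
theorem contains_congr {vis vis' : List (Int × Int)} (h : ∀ d, d ∈ vis ↔ d ∈ vis')
    (c : Int × Int) : vis.contains c = vis'.contains c := by
  by_cases hc : c ∈ vis
  · simp [List.contains_eq_mem, hc, (h c).mp hc]
  · simp [List.contains_eq_mem, hc, mt (h c).mpr hc]

-- one discovered component, on both sides, under set-equal visited lists
theorem component_step (g : List (List Int)) (h w : Nat)
    {visA visB : List (Int × Int)} (hvis : ∀ d, d ∈ visA ↔ d ∈ visB)
    {c : Int × Int} (hc : InR (h : Int) (w : Int) c) (hcA : c ∉ visA) :
    ∃ (visFA visFB P P' : List (Int × Int)) (n2 : Nat),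
      bfsSize g (h : Int) (w : Int) (h * w + 1) (c :: visA) [c] 0 = (visFA, (P.length : Int)) ∧
      dfsComp g (h : Int) (w : Int) (h * w + 1) (c :: visB) [c] [] = (visFB, P') ∧
      P.length = n2 ∧ P'.length = n2 ∧ 1 ≤ n2 ∧
      (∀ d, d ∈ P ↔ d ∈ P') ∧
      (∀ d ∈ P, InR (h : Int) (w : Int) d) ∧
      (∀ d, d ∈ visFA ↔ (d ∈ visA ∨ d ∈ P)) ∧
      (∀ d, d ∈ visFA ↔ d ∈ visFB) := by
  have hcB : c ∉ visB := fun hx => hcA ((hvis c).mpr hx)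
  obtain ⟨visFA, P, heqA, hinvA⟩ :=
    bfsSize_run g h w (· ∈ visA) c hc (h * w + 1) (c :: visA) [c] [] 0
      (inv_init g (h : Int) (w : Int) visA c) (by simp)
  obtain ⟨hPmem, hAvis, hPnd⟩ := inv_final hcA (by simpa using hinvA)
  obtain ⟨visFB, P'c, P', heqB, hinvB, hcomp⟩ :=
    dfsComp_run g h w (· ∈ visB) c hc (h * w + 1) (c :: visB) [c] [] []
      (inv_init g (h : Int) (w : Int) visB c) (List.Perm.refl _) (by simp)
  obtain ⟨hPmem', hBvis, hPnd'⟩ := inv_final hcB (by simpa using hinvB)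
  have hRch : ∀ d, Rch g (h : Int) (w : Int) (· ∈ visA) c d ↔ Rch g (h : Int) (w : Int) (· ∈ visB) c d :=
    fun d => ⟨Rch_congr hvis, Rch_congr (fun e => (hvis e).symm)⟩
  have hPP' : ∀ d, d ∈ P ↔ d ∈ P'c := by
    intro d
    rw [hPmem d, hRch d, ← hPmem' d, hcomp.mem_iff]
    simp
  have hlen : P.length = P'c.length := by
    have hnd'' : P'c.Nodup := (hcomp.nodup_iff).mpr (by simpa using hPnd')
    exact ((List.perm_ext_iff_of_nodup hPnd hnd'').mpr hPP').length_eq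
  refine ⟨visFA, visFB, P, P'c, P.length, by simpa using heqA, heqB, rfl, hlen.symm, ?_, hPP', ?_, ?_, ?_⟩
  · have hcp : c ∈ P := (hPmem c).mpr Rch.base
    have := List.length_pos_of_mem hcp
    omega
  · intro d hd
    exact Rch_inR hc ((hPmem d).mp hd)
  · intro d
    rw [hAvis d, hPmem d]
  · intro d
    rw [hAvis d, hBvis d]
    constructor
    · rintro (hx | hx)
      · exact Or.inl ((hvis d).mp hx)
      · exact Or.inr ((hRch d).mp hx)
    · rintro (hx | hx)
      · exact Or.inl ((hvis d).mpr hx)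
      · exact Or.inr ((hRch d).mpr hx)

theorem sim1 (g : List (List Int)) (h w : Nat) :
    ∀ (L : List (Int × Int)), (∀ c ∈ L, InR (h : Int) (w : Int) c) →
    ∀ (visA visB : List (Int × Int)) (m : Int) (comps : List (List (Int × Int))),
    (∀ d, d ∈ visA ↔ d ∈ visB) →
    m = (comps.map (fun cp => (cp.length : Int))).foldl mstep 0 →
    (∀ cp ∈ comps, cp ≠ []) →
    ((L.foldl (pass1Step g (h : Int) (w : Int) (h * w + 1)) (visA, m)).2
       = (((L.foldl (scanStep g (h : Int) (w : Int) (h * w + 1)) (visB, comps)).2.map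
           (fun cp => (cp.length : Int))).foldl mstep 0) ∧
     (∀ cp ∈ (L.foldl (scanStep g (h : Int) (w : Int) (h * w + 1)) (visB, comps)).2, cp ≠ []))
  | [], _, visA, visB, m, comps, hvis, hm, hne => ⟨hm, hne⟩
  | c :: L, hL, visA, visB, m, comps, hvis, hm, hne => by
    have hcin := hL c (by simp)
    have hLrest : ∀ d ∈ L, InR (h : Int) (w : Int) d := fun d hd => hL d (by simp [hd])
    simp only [List.foldl_cons]
    by_cases hg : pvGet g c.1 c.2 == 0 && !(visA.contains c)
    · have hgB : (pvGet g c.1 c.2 == 0 && !(visB.contains c)) = true := by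
        rw [← contains_congr hvis c]; exact hg
      have hcA : c ∉ visA := by
        simp only [Bool.and_eq_true, Bool.not_eq_eq_eq_not, Bool.not_true] at hg
        simpa [List.contains_eq_mem] using hg.2
      obtain ⟨visFA, visFB, P, P', n2, heqA, heqB, hlA, hlB, hn2, hPP', hPin, hvisP, hvisF⟩ :=
        component_step g h w hvis hcin hcA
      have hA : pass1Step g (h : Int) (w : Int) (h * w + 1) (visA, m) c
          = (visFA, mstep m (P.length : Int)) := by
        unfold pass1Step
        rw [if_pos hg]
        simp only [heqA]
        rfl
      have hB : scanStep g (h : Int) (w : Int) (h * w + 1) (visB, comps) c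
          = (visFB, comps ++ [P']) := by
        unfold scanStep
        rw [if_pos hgB]
        simp only [heqB]
      rw [hA, hB]
      apply sim1 g h w L hLrest visFA visFB _ _ hvisF
      · rw [hm]
        simp [mstep, hlA, hlB]
      · intro cp hcp
        rcases List.mem_append.mp hcp with hx | hx
        · exact hne cp hx
        · simp at hx; subst hx
          intro hnil
          rw [hnil] at hlB
          simp at hlB
          omega
    · have hgB : (pvGet g c.1 c.2 == 0 && !(visB.contains c)) = false := by
        rw [← contains_congr hvis c]
        simpa using hg
      have hA : pass1Step g (h : Int) (w : Int) (h * w + 1) (visA, m) c = (visA, m) := by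
        unfold pass1Step
        rw [if_neg (by simpa using hg)]
      have hB : scanStep g (h : Int) (w : Int) (h * w + 1) (visB, comps) c = (visB, comps) := by
        unfold scanStep
        rw [if_neg (by rw [hgB]; simp)]
      rw [hA, hB]
      exact sim1 g h w L hLrest visA visB m comps hvis hm hne

-- ===== simulation of A's second pass against B's scan-then-fill =====
def fillPred (M : Int) (comps : List (List (Int × Int))) (d : Int × Int) : Bool :=
  comps.any (fun cp => ((cp.length : Int) < M) && cp.contains d)

theorem toNat_roundtrip {h w : Nat} {d : Int × Int} (hd : InR (h : Int) (w : Int) d) :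
    ((d.1.toNat : Int), (d.2.toNat : Int)) = d := by
  obtain ⟨h1, _, h3, _⟩ := hd
  rw [Prod.ext_iff]
  constructor <;> simp <;> omega

theorem sim2 (g : List (List Int)) (h w : Nat) (M : Int) :
    ∀ (L : List (Int × Int)), (∀ c ∈ L, InR (h : Int) (w : Int) c) →
    ∀ (visA visB : List (Int × Int)) (comps : List (List (Int × Int))),
    (∀ d, d ∈ visA ↔ d ∈ visB) →
    (∀ cp ∈ comps, ∀ d ∈ cp, InR (h : Int) (w : Int) d ∧ d ∈ visB) →
    ((L.foldl (pass2Step (h : Int) (w : Int) (h * w + 1) M) (pwF g (fillPred M comps), visA)).1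
      = pwF g (fillPred M ((L.foldl (scanStep g (h : Int) (w : Int) (h * w + 1)) (visB, comps)).2)))
    ∧ (∀ cp ∈ (L.foldl (scanStep g (h : Int) (w : Int) (h * w + 1)) (visB, comps)).2,
        ∀ d ∈ cp, 0 ≤ d.1 ∧ 0 ≤ d.2)
  | [], _, visA, visB, comps, hvis, hcomps => by
    refine ⟨rfl, ?_⟩
    intro cp hcp d hd
    have := (hcomps cp hcp d hd).1
    exact ⟨this.1, this.2.2.1⟩
  | c :: L, hL, visA, visB, comps, hvis, hcomps => by
    have hcin := hL c (by simp)
    have hLrest : ∀ d ∈ L, InR (h : Int) (w : Int) d := fun d hd => hL d (by simp [hd])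
    have hfillmem : ∀ d, fillPred M comps d = true → d ∈ visB := by
      intro d hd
      unfold fillPred at hd
      rw [List.any_eq_true] at hd
      obtain ⟨cp, hcp, hx⟩ := hd
      rw [Bool.and_eq_true] at hx
      exact (hcomps cp hcp d (by simpa [List.contains_eq_mem] using hx.2)).2
    have hout : ∀ d, InR (h : Int) (w : Int) d →
        pvGet (pwF g (fillPred M comps)) d.1 d.2 ≠ pvGet g d.1 d.2 → d ∈ visA := by
      intro d hd hne
      by_contra hdA
      apply hne
      apply pvGet_pw_eq
      rw [toNat_roundtrip hd]
      by_contra hf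
      rw [Bool.not_eq_false] at hf
      exact hdA ((hvis d).mpr (hfillmem d hf))
    simp only [List.foldl_cons]
    by_cases hgB : pvGet g c.1 c.2 == 0 && !(visB.contains c)
    · have hcB : c ∉ visB := by
        simp only [Bool.and_eq_true, Bool.not_eq_eq_eq_not, Bool.not_true] at hgB
        simpa [List.contains_eq_mem] using hgB.2
      have hcA : c ∉ visA := fun hx => hcB ((hvis c).mp hx)
      have hgA : (pvGet (pwF g (fillPred M comps)) c.1 c.2 == 0 && !(visA.contains c)) = true := by
        have : pvGet (pwF g (fillPred M comps)) c.1 c.2 = pvGet g c.1 c.2 := by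
          by_contra hne
          exact hcA (hout c hcin hne)
        rw [this, contains_congr hvis c]
        exact hgB
      -- run A's fill BFS and B's DFS
      obtain ⟨visFA, compFA, P, heqA, hinvA, hcompA⟩ :=
        bfsFill_run (pwF g (fillPred M comps)) g h w (· ∈ visA) c hcin
          (fun d hd hne => hout d hd hne) (h * w + 1) (c :: visA) [c] [c] []
          (inv_init g (h : Int) (w : Int) visA c) (by simp) (by simp)
      obtain ⟨hPmem, hAvis, hPnd⟩ := inv_final hcA (by simpa using hinvA)
      obtain ⟨visFB, compFB, P', heqB, hinvB, hcompB⟩ :=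
        dfsComp_run g h w (· ∈ visB) c hcin (h * w + 1) (c :: visB) [c] [] []
          (inv_init g (h : Int) (w : Int) visB c) (List.Perm.refl _) (by simp)
      obtain ⟨hPmem', hBvis, hPnd'⟩ := inv_final hcB (by simpa using hinvB)
      have hRch : ∀ d, Rch g (h : Int) (w : Int) (· ∈ visA) c d ↔ Rch g (h : Int) (w : Int) (· ∈ visB) c d :=
        fun d => ⟨Rch_congr hvis, Rch_congr (fun e => (hvis e).symm)⟩
      have hcompA' : ∀ d, d ∈ compFA ↔ Rch g (h : Int) (w : Int) (· ∈ visA) c d := by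
        intro d
        rw [hcompA.mem_iff]
        simpa using hPmem d
      have hcompB' : ∀ d, d ∈ compFB ↔ Rch g (h : Int) (w : Int) (· ∈ visB) c d := by
        intro d
        rw [hcompB.mem_iff]
        simpa using hPmem' d
      have hcompAB : ∀ d, d ∈ compFA ↔ d ∈ compFB := by
        intro d
        rw [hcompA' d, hcompB' d, hRch d]
      have hndA : compFA.Nodup := hcompA.nodup_iff.mpr (by simpa using hPnd)
      have hndB : compFB.Nodup := hcompB.nodup_iff.mpr (by simpa using hPnd')
      have hlenAB : compFA.length = compFB.length :=
        ((List.perm_ext_iff_of_nodup hndA hndB).mpr hcompAB).length_eq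
      have hcompA_in : ∀ d ∈ compFA, InR (h : Int) (w : Int) d :=
        fun d hd => Rch_inR hcin ((hcompA' d).mp hd)
      have hA : pass2Step (h : Int) (w : Int) (h * w + 1) M (pwF g (fillPred M comps), visA) c
          = ((if (compFA.length : Int) < M
              then compFA.foldl (fun o p => pvSet o p.1 p.2 4) (pwF g (fillPred M comps))
              else pwF g (fillPred M comps)), visFA) := by
        unfold pass2Step
        rw [if_pos hgA]
        simp only [heqA]
      have hB : scanStep g (h : Int) (w : Int) (h * w + 1) (visB, comps) c = (visFB, comps ++ [compFB]) := by
        unfold scanStep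
        rw [if_pos hgB]
        simp only [heqB]
      rw [hA, hB]
      have hvisF : ∀ d, d ∈ visFA ↔ d ∈ visFB := by
        intro d
        rw [hAvis d, hBvis d]
        constructor
        · rintro (hx | hx)
          · exact Or.inl ((hvis d).mp hx)
          · exact Or.inr ((hRch d).mp hx)
        · rintro (hx | hx)
          · exact Or.inl ((hvis d).mpr hx)
          · exact Or.inr ((hRch d).mpr hx)
      have hcomps' : ∀ cp ∈ comps ++ [compFB], ∀ d ∈ cp, InR (h : Int) (w : Int) d ∧ d ∈ visFB := by
        intro cp hcp d hd
        rcases List.mem_append.mp hcp with hx | hx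
        · obtain ⟨hin, hmem⟩ := hcomps cp hx d hd
          exact ⟨hin, (hBvis d).mpr (Or.inl hmem)⟩
        · simp at hx; subst hx
          refine ⟨Rch_inR hcin ((hcompB' d).mp hd), (hBvis d).mpr (Or.inr ((hcompB' d).mp hd))⟩
      have hfillnew : pwF g (fillPred M (comps ++ [compFB]))
          = (if (compFA.length : Int) < M
             then compFA.foldl (fun o p => pvSet o p.1 p.2 4) (pwF g (fillPred M comps))
             else pwF g (fillPred M comps)) := by
        by_cases hsm : (compFA.length : Int) < M
        · rw [if_pos hsm]
          rw [fill_foldl g compFA (fillPred M comps)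
            (fun d hd => ⟨(hcompA_in d hd).1, (hcompA_in d hd).2.2.1⟩)]
          apply pw_congr
          intro d
          have hcont : compFA.contains d = compFB.contains d := by
            by_cases hd : d ∈ compFA
            · simp [List.contains_eq_mem, hd, (hcompAB d).mp hd]
            · simp [List.contains_eq_mem, hd, mt (hcompAB d).mpr hd]
          have hlt : (compFB.length : Int) < M := by rw [← hlenAB]; exact hsm
          simp only [fillPred, List.any_append, List.any_cons, List.any_nil, Bool.or_false]
          rw [hcont]
          simp [hlt]
        · rw [if_neg hsm]
          apply pw_congr
          intro d
          have hlt : ¬ ((compFB.length : Int) < M) := by rw [← hlenAB]; exact hsm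
          simp only [fillPred, List.any_append, List.any_cons, List.any_nil, Bool.or_false]
          simp [hlt]
      rw [← hfillnew]
      exact sim2 g h w M L hLrest visFA visFB (comps ++ [compFB]) hvisF hcomps'
    · have hgA : (pvGet (pwF g (fillPred M comps)) c.1 c.2 == 0 && !(visA.contains c)) = false := by
        by_cases hcA : c ∈ visA
        · simp [List.contains_eq_mem, hcA]
        · have : pvGet (pwF g (fillPred M comps)) c.1 c.2 = pvGet g c.1 c.2 := by
            by_contra hne
            exact hcA (hout c hcin hne)
          rw [this, contains_congr hvis c]
          simpa using hgB
      have hA : pass2Step (h : Int) (w : Int) (h * w + 1) M (pwF g (fillPred M comps), visA) c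
          = (pwF g (fillPred M comps), visA) := by
        unfold pass2Step
        rw [if_neg (by rw [hgA]; simp)]
      have hB : scanStep g (h : Int) (w : Int) (h * w + 1) (visB, comps) c = (visB, comps) := by
        unfold scanStep
        rw [if_neg hgB]
      rw [hA, hB]
      exact sim2 g h w M L hLrest visA visB comps hvis hcomps

-- ===== main equivalence =====
theorem transform_equal (grid : List (List Int)) : transform grid = transform_alt grid := by
  unfold transform transform_alt
  by_cases hemp : (grid.isEmpty || (grid.headD []).isEmpty) = true
  · rw [if_pos hemp, if_pos hemp]
  · rw [if_neg hemp, if_neg hemp]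
    dsimp only
    set h := grid.length with hh_def
    set w := (grid.headD []).length with hw_def
    have hcells : ∀ c ∈ pvCells h w, InR (h : Int) (w : Int) c :=
      fun c hc => (mem_pvCells h w c).mp hc
    set pa := (pvCells h w).foldl (pass1Step grid (h : Int) (w : Int) (h * w + 1)) ([], 0) with hpa
    set sb := (pvCells h w).foldl (scanStep grid (h : Int) (w : Int) (h * w + 1)) ([], []) with hsb
    obtain ⟨hm, hne⟩ := sim1 grid h w (pvCells h w) hcells [] [] 0 []
      (fun d => Iff.rfl) (by simp) (by simp)
    rw [← hpa, ← hsb] at hm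
    rw [← hsb] at hne
    rcases hcse : sb.2 with _ | ⟨c0, rest⟩
    · -- no zero component on either side
      rw [hcse] at hm
      simp only [List.map_nil, List.foldl_nil] at hm
      rw [if_pos (by simp [hm])]
    · -- at least one component
      rw [hcse] at hm hne
      have hlen0 : 1 ≤ c0.length := by
        have := hne c0 (by simp)
        cases hc0 : c0 with
        | nil => exact absurd hc0 this
        | cons a l => simp
      have hm1 : (c0.length : Int) ≤ pa.2 := by
        rw [hm]
        simp only [List.map_cons, List.foldl_cons]
        have h1 : mstep 0 (c0.length : Int) = (c0.length : Int) := by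
          unfold mstep
          rw [if_pos (by exact_mod_cast hlen0)]
        rw [h1]
        exact le_foldl_mstep _ _
    -- A's max is nonzero
      have hpos : ¬ (pa.2 == 0) = true := by
        simp only [beq_iff_eq]
        intro hz
        rw [hz] at hm1
        omega
      rw [if_neg hpos]
      -- identify A's max with B's biggest
      have hbig : rest.foldl (fun m c => if (c.length : Int) > m then (c.length : Int) else m)
          ((c0.length : Int)) = pa.2 := by
        rw [hm]
        simp only [List.map_cons, List.foldl_cons]
        have h1 : mstep 0 (c0.length : Int) = (c0.length : Int) := by
          unfold mstep
          rw [if_pos (by exact_mod_cast hlen0)]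
        rw [h1, List.foldl_map]
        rfl
      -- both sides are the pointwise fill of the components of the scan
      obtain ⟨hA, hnn⟩ := sim2 grid h w pa.2 (pvCells h w) hcells [] [] []
        (fun d => Iff.rfl) (by simp)
      rw [← hsb] at hA hnn
      have hstart : pwF grid (fillPred pa.2 []) = grid := by
        rw [pw_congr grid (f' := fun _ => false) (fun d => by simp [fillPred]), pw_false]
      rw [hstart] at hA
      rw [hA, hcse]
      dsimp only
      rw [hbig]
      have hnn' : ∀ cp ∈ sb.2, ∀ d ∈ cp, 0 ≤ d.1 ∧ 0 ≤ d.2 := hnn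
      rw [hcse] at hnn'
      calc pwF grid (fillPred pa.2 (c0 :: rest))
          = (c0 :: rest).foldl (fillStep pa.2) (pwF grid (fun _ => false)) := by
            rw [fill_outer grid pa.2 (c0 :: rest) (fun _ => false) hnn']
            exact pw_congr grid (fun d => by simp [fillPred])
        _ = (c0 :: rest).foldl (fillStep pa.2) grid := by rw [pw_false]


-- ===== VERDICT (by name: the statement is the Claim_ definition above) =====
theorem transform_spec : Claim_equal_transform := by
  intro grid _ _
  unfold Spec_transform
  exact transform_equal grid
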